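-- pv_equiv track=rewrite | github.com/yeshi-2001/Lost_And_Found_System | backend/matching_service.py | similar_colors
-- ===== SOURCE A (Python) =====
-- def similar_colors(color1, color2):
--     """Check if colors are similar"""
--     color_groups = [
--         ['black', 'dark'],
--         ['white', 'light'],
--         ['blue', 'navy', 'dark blue'],
--         ['red', 'maroon', 'dark red'],
--         ['green', 'dark green'],
--         ['brown', 'tan', 'beige'],
--         ['grey', 'gray', 'silver']
--     ]
--
--     color1_lower = color1.lower()
--     color2_lower = color2.lower()
--
--     for group in color_groups:
--         if color1_lower in group and color2_lower in group:
--             return True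
--     return False
-- ===== SOURCE B (Python) =====
-- # B: one precomputed color->group-id index; membership-guarded keyed comparison replaces the scan over groups.
-- _COLOR_INDEX = {
--     'black': 0, 'dark': 0,
--     'white': 1, 'light': 1,
--     'blue': 2, 'navy': 2, 'dark blue': 2,
--     'red': 3, 'maroon': 3, 'dark red': 3,
--     'green': 4, 'dark green': 4,
--     'brown': 5, 'tan': 5, 'beige': 5,
--     'grey': 6, 'gray': 6, 'silver': 6,
-- }
--
--
-- def similar_colors(color1, color2):
--     """Check if colors are similar"""
--     g1 = _COLOR_INDEX.get(color1.lower())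
--     if g1 is None:
--         return False
--     return _COLOR_INDEX.get(color2.lower()) == g1
-- ===== Notes on version B (the rewrite author's own statement) =====
-- stated objective: faster
-- what changed: Replaces the per-call scan over all color groups (list membership tested twice per group) with a single precomputed color->group-id dictionary and one guarded lookup per argument.
import Mathlib
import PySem

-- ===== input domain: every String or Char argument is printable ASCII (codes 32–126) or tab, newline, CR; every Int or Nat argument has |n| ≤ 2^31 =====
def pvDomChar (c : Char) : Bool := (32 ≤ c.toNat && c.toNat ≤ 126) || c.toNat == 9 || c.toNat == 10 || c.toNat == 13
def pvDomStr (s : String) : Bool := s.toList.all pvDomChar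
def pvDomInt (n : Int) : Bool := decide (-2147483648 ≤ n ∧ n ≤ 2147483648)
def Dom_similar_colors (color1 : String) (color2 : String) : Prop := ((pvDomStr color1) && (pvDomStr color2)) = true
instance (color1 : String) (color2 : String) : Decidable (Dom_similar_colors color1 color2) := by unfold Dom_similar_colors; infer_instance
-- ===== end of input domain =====

-- B replaces A's per-call scan over the color groups with one precomputed color→group-id map and a guarded keyed comparison.

-- ===== PORT A =====
def pvGroups : List (List String) :=
  [["black", "dark"],
   ["white", "light"],
   ["blue", "navy", "dark blue"],
   ["red", "maroon", "dark red"],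
   ["green", "dark green"],
   ["brown", "tan", "beige"],
   ["grey", "gray", "silver"]]

-- the 'for group in color_groups: if c1 in group and c2 in group: return True' loop is List.any
def similar_colors (color1 : String) (color2 : String) : Bool :=
  let color1_lower := PySem.Str.lower color1
  let color2_lower := PySem.Str.lower color2
  pvGroups.any (fun group => group.contains color1_lower && group.contains color2_lower)

-- ===== PORT B =====
-- the module-level dict literal _COLOR_INDEX
def pvColorIndex : PySem.Dict String Nat :=
  PySem.Dict.mk
    [("black", 0), ("dark", 0),
     ("white", 1), ("light", 1),
     ("blue", 2), ("navy", 2), ("dark blue", 2),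
     ("red", 3), ("maroon", 3), ("dark red", 3),
     ("green", 4), ("dark green", 4),
     ("brown", 5), ("tan", 5), ("beige", 5),
     ("grey", 6), ("gray", 6), ("silver", 6)]

def similar_colors_alt (color1 : String) (color2 : String) : Bool :=
  match pvColorIndex.get? (PySem.Str.lower color1) with
  | none => false
  | some g1 => pvColorIndex.get? (PySem.Str.lower color2) == some g1

-- ===== PRECONDITION & SPEC =====
def Spec_similar_colors (color1 : String) (color2 : String) (out : Bool) : Prop := out = similar_colors_alt color1 color2
instance (color1 : String) (color2 : String) (out : Bool) : Decidable (Spec_similar_colors color1 color2 out) := by unfold Spec_similar_colors; infer_instance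

-- ===== CLAIM (what is proved, stated in full; the proofs are below) =====
def Claim_equal_similar_colors : Prop := ∀ (color1 : String) (color2 : String), Dom_similar_colors color1 color2 → Spec_similar_colors color1 color2 (similar_colors color1 color2)

-- ===== LEMMAS AND PROOFS =====
-- For each group j: membership of t in group j equals the index lookup returning j.
lemma pv_c0 (t : String) : (["black","dark"]:List String).contains t = (pvColorIndex.get? t == some 0) := by
  simp only [pvColorIndex, PySem.Dict.get?_mk_cons, List.contains_cons, List.contains_nil]
  by_cases h0 : t = "black"
  · subst h0; decide
  rw [if_neg (fun hh => h0 (eq_of_beq hh).symm)]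
  by_cases h1 : t = "dark"
  · subst h1; decide
  rw [if_neg (fun hh => h1 (eq_of_beq hh).symm)]
  by_cases h2 : t = "white"
  · subst h2; decide
  rw [if_neg (fun hh => h2 (eq_of_beq hh).symm)]
  by_cases h3 : t = "light"
  · subst h3; decide
  rw [if_neg (fun hh => h3 (eq_of_beq hh).symm)]
  by_cases h4 : t = "blue"
  · subst h4; decide
  rw [if_neg (fun hh => h4 (eq_of_beq hh).symm)]
  by_cases h5 : t = "navy"
  · subst h5; decide
  rw [if_neg (fun hh => h5 (eq_of_beq hh).symm)]
  by_cases h6 : t = "dark blue"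
  · subst h6; decide
  rw [if_neg (fun hh => h6 (eq_of_beq hh).symm)]
  by_cases h7 : t = "red"
  · subst h7; decide
  rw [if_neg (fun hh => h7 (eq_of_beq hh).symm)]
  by_cases h8 : t = "maroon"
  · subst h8; decide
  rw [if_neg (fun hh => h8 (eq_of_beq hh).symm)]
  by_cases h9 : t = "dark red"
  · subst h9; decide
  rw [if_neg (fun hh => h9 (eq_of_beq hh).symm)]
  by_cases h10 : t = "green"
  · subst h10; decide
  rw [if_neg (fun hh => h10 (eq_of_beq hh).symm)]
  by_cases h11 : t = "dark green"
  · subst h11; decide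
  rw [if_neg (fun hh => h11 (eq_of_beq hh).symm)]
  by_cases h12 : t = "brown"
  · subst h12; decide
  rw [if_neg (fun hh => h12 (eq_of_beq hh).symm)]
  by_cases h13 : t = "tan"
  · subst h13; decide
  rw [if_neg (fun hh => h13 (eq_of_beq hh).symm)]
  by_cases h14 : t = "beige"
  · subst h14; decide
  rw [if_neg (fun hh => h14 (eq_of_beq hh).symm)]
  by_cases h15 : t = "grey"
  · subst h15; decide
  rw [if_neg (fun hh => h15 (eq_of_beq hh).symm)]
  by_cases h16 : t = "gray"
  · subst h16; decide
  rw [if_neg (fun hh => h16 (eq_of_beq hh).symm)]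
  by_cases h17 : t = "silver"
  · subst h17; decide
  rw [if_neg (fun hh => h17 (eq_of_beq hh).symm)]
  simp [PySem.Dict.get?, h0, h1]

lemma pv_c1 (t : String) : (["white","light"]:List String).contains t = (pvColorIndex.get? t == some 1) := by
  simp only [pvColorIndex, PySem.Dict.get?_mk_cons, List.contains_cons, List.contains_nil]
  by_cases h0 : t = "black"
  · subst h0; decide
  rw [if_neg (fun hh => h0 (eq_of_beq hh).symm)]
  by_cases h1 : t = "dark"
  · subst h1; decide
  rw [if_neg (fun hh => h1 (eq_of_beq hh).symm)]
  by_cases h2 : t = "white"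
  · subst h2; decide
  rw [if_neg (fun hh => h2 (eq_of_beq hh).symm)]
  by_cases h3 : t = "light"
  · subst h3; decide
  rw [if_neg (fun hh => h3 (eq_of_beq hh).symm)]
  by_cases h4 : t = "blue"
  · subst h4; decide
  rw [if_neg (fun hh => h4 (eq_of_beq hh).symm)]
  by_cases h5 : t = "navy"
  · subst h5; decide
  rw [if_neg (fun hh => h5 (eq_of_beq hh).symm)]
  by_cases h6 : t = "dark blue"
  · subst h6; decide
  rw [if_neg (fun hh => h6 (eq_of_beq hh).symm)]
  by_cases h7 : t = "red"
  · subst h7; decide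
  rw [if_neg (fun hh => h7 (eq_of_beq hh).symm)]
  by_cases h8 : t = "maroon"
  · subst h8; decide
  rw [if_neg (fun hh => h8 (eq_of_beq hh).symm)]
  by_cases h9 : t = "dark red"
  · subst h9; decide
  rw [if_neg (fun hh => h9 (eq_of_beq hh).symm)]
  by_cases h10 : t = "green"
  · subst h10; decide
  rw [if_neg (fun hh => h10 (eq_of_beq hh).symm)]
  by_cases h11 : t = "dark green"
  · subst h11; decide
  rw [if_neg (fun hh => h11 (eq_of_beq hh).symm)]
  by_cases h12 : t = "brown"
  · subst h12; decide
  rw [if_neg (fun hh => h12 (eq_of_beq hh).symm)]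
  by_cases h13 : t = "tan"
  · subst h13; decide
  rw [if_neg (fun hh => h13 (eq_of_beq hh).symm)]
  by_cases h14 : t = "beige"
  · subst h14; decide
  rw [if_neg (fun hh => h14 (eq_of_beq hh).symm)]
  by_cases h15 : t = "grey"
  · subst h15; decide
  rw [if_neg (fun hh => h15 (eq_of_beq hh).symm)]
  by_cases h16 : t = "gray"
  · subst h16; decide
  rw [if_neg (fun hh => h16 (eq_of_beq hh).symm)]
  by_cases h17 : t = "silver"
  · subst h17; decide
  rw [if_neg (fun hh => h17 (eq_of_beq hh).symm)]
  simp [PySem.Dict.get?, h2, h3]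

lemma pv_c2 (t : String) : (["blue","navy","dark blue"]:List String).contains t = (pvColorIndex.get? t == some 2) := by
  simp only [pvColorIndex, PySem.Dict.get?_mk_cons, List.contains_cons, List.contains_nil]
  by_cases h0 : t = "black"
  · subst h0; decide
  rw [if_neg (fun hh => h0 (eq_of_beq hh).symm)]
  by_cases h1 : t = "dark"
  · subst h1; decide
  rw [if_neg (fun hh => h1 (eq_of_beq hh).symm)]
  by_cases h2 : t = "white"
  · subst h2; decide
  rw [if_neg (fun hh => h2 (eq_of_beq hh).symm)]
  by_cases h3 : t = "light"
  · subst h3; decide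
  rw [if_neg (fun hh => h3 (eq_of_beq hh).symm)]
  by_cases h4 : t = "blue"
  · subst h4; decide
  rw [if_neg (fun hh => h4 (eq_of_beq hh).symm)]
  by_cases h5 : t = "navy"
  · subst h5; decide
  rw [if_neg (fun hh => h5 (eq_of_beq hh).symm)]
  by_cases h6 : t = "dark blue"
  · subst h6; decide
  rw [if_neg (fun hh => h6 (eq_of_beq hh).symm)]
  by_cases h7 : t = "red"
  · subst h7; decide
  rw [if_neg (fun hh => h7 (eq_of_beq hh).symm)]
  by_cases h8 : t = "maroon"
  · subst h8; decide
  rw [if_neg (fun hh => h8 (eq_of_beq hh).symm)]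
  by_cases h9 : t = "dark red"
  · subst h9; decide
  rw [if_neg (fun hh => h9 (eq_of_beq hh).symm)]
  by_cases h10 : t = "green"
  · subst h10; decide
  rw [if_neg (fun hh => h10 (eq_of_beq hh).symm)]
  by_cases h11 : t = "dark green"
  · subst h11; decide
  rw [if_neg (fun hh => h11 (eq_of_beq hh).symm)]
  by_cases h12 : t = "brown"
  · subst h12; decide
  rw [if_neg (fun hh => h12 (eq_of_beq hh).symm)]
  by_cases h13 : t = "tan"
  · subst h13; decide
  rw [if_neg (fun hh => h13 (eq_of_beq hh).symm)]
  by_cases h14 : t = "beige"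
  · subst h14; decide
  rw [if_neg (fun hh => h14 (eq_of_beq hh).symm)]
  by_cases h15 : t = "grey"
  · subst h15; decide
  rw [if_neg (fun hh => h15 (eq_of_beq hh).symm)]
  by_cases h16 : t = "gray"
  · subst h16; decide
  rw [if_neg (fun hh => h16 (eq_of_beq hh).symm)]
  by_cases h17 : t = "silver"
  · subst h17; decide
  rw [if_neg (fun hh => h17 (eq_of_beq hh).symm)]
  simp [PySem.Dict.get?, h4, h5, h6]

lemma pv_c3 (t : String) : (["red","maroon","dark red"]:List String).contains t = (pvColorIndex.get? t == some 3) := by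
  simp only [pvColorIndex, PySem.Dict.get?_mk_cons, List.contains_cons, List.contains_nil]
  by_cases h0 : t = "black"
  · subst h0; decide
  rw [if_neg (fun hh => h0 (eq_of_beq hh).symm)]
  by_cases h1 : t = "dark"
  · subst h1; decide
  rw [if_neg (fun hh => h1 (eq_of_beq hh).symm)]
  by_cases h2 : t = "white"
  · subst h2; decide
  rw [if_neg (fun hh => h2 (eq_of_beq hh).symm)]
  by_cases h3 : t = "light"
  · subst h3; decide
  rw [if_neg (fun hh => h3 (eq_of_beq hh).symm)]
  by_cases h4 : t = "blue"
  · subst h4; decide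
  rw [if_neg (fun hh => h4 (eq_of_beq hh).symm)]
  by_cases h5 : t = "navy"
  · subst h5; decide
  rw [if_neg (fun hh => h5 (eq_of_beq hh).symm)]
  by_cases h6 : t = "dark blue"
  · subst h6; decide
  rw [if_neg (fun hh => h6 (eq_of_beq hh).symm)]
  by_cases h7 : t = "red"
  · subst h7; decide
  rw [if_neg (fun hh => h7 (eq_of_beq hh).symm)]
  by_cases h8 : t = "maroon"
  · subst h8; decide
  rw [if_neg (fun hh => h8 (eq_of_beq hh).symm)]
  by_cases h9 : t = "dark red"
  · subst h9; decide
  rw [if_neg (fun hh => h9 (eq_of_beq hh).symm)]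
  by_cases h10 : t = "green"
  · subst h10; decide
  rw [if_neg (fun hh => h10 (eq_of_beq hh).symm)]
  by_cases h11 : t = "dark green"
  · subst h11; decide
  rw [if_neg (fun hh => h11 (eq_of_beq hh).symm)]
  by_cases h12 : t = "brown"
  · subst h12; decide
  rw [if_neg (fun hh => h12 (eq_of_beq hh).symm)]
  by_cases h13 : t = "tan"
  · subst h13; decide
  rw [if_neg (fun hh => h13 (eq_of_beq hh).symm)]
  by_cases h14 : t = "beige"
  · subst h14; decide
  rw [if_neg (fun hh => h14 (eq_of_beq hh).symm)]
  by_cases h15 : t = "grey"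
  · subst h15; decide
  rw [if_neg (fun hh => h15 (eq_of_beq hh).symm)]
  by_cases h16 : t = "gray"
  · subst h16; decide
  rw [if_neg (fun hh => h16 (eq_of_beq hh).symm)]
  by_cases h17 : t = "silver"
  · subst h17; decide
  rw [if_neg (fun hh => h17 (eq_of_beq hh).symm)]
  simp [PySem.Dict.get?, h7, h8, h9]

lemma pv_c4 (t : String) : (["green","dark green"]:List String).contains t = (pvColorIndex.get? t == some 4) := by
  simp only [pvColorIndex, PySem.Dict.get?_mk_cons, List.contains_cons, List.contains_nil]
  by_cases h0 : t = "black"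
  · subst h0; decide
  rw [if_neg (fun hh => h0 (eq_of_beq hh).symm)]
  by_cases h1 : t = "dark"
  · subst h1; decide
  rw [if_neg (fun hh => h1 (eq_of_beq hh).symm)]
  by_cases h2 : t = "white"
  · subst h2; decide
  rw [if_neg (fun hh => h2 (eq_of_beq hh).symm)]
  by_cases h3 : t = "light"
  · subst h3; decide
  rw [if_neg (fun hh => h3 (eq_of_beq hh).symm)]
  by_cases h4 : t = "blue"
  · subst h4; decide
  rw [if_neg (fun hh => h4 (eq_of_beq hh).symm)]
  by_cases h5 : t = "navy"
  · subst h5; decide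
  rw [if_neg (fun hh => h5 (eq_of_beq hh).symm)]
  by_cases h6 : t = "dark blue"
  · subst h6; decide
  rw [if_neg (fun hh => h6 (eq_of_beq hh).symm)]
  by_cases h7 : t = "red"
  · subst h7; decide
  rw [if_neg (fun hh => h7 (eq_of_beq hh).symm)]
  by_cases h8 : t = "maroon"
  · subst h8; decide
  rw [if_neg (fun hh => h8 (eq_of_beq hh).symm)]
  by_cases h9 : t = "dark red"
  · subst h9; decide
  rw [if_neg (fun hh => h9 (eq_of_beq hh).symm)]
  by_cases h10 : t = "green"
  · subst h10; decide
  rw [if_neg (fun hh => h10 (eq_of_beq hh).symm)]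
  by_cases h11 : t = "dark green"
  · subst h11; decide
  rw [if_neg (fun hh => h11 (eq_of_beq hh).symm)]
  by_cases h12 : t = "brown"
  · subst h12; decide
  rw [if_neg (fun hh => h12 (eq_of_beq hh).symm)]
  by_cases h13 : t = "tan"
  · subst h13; decide
  rw [if_neg (fun hh => h13 (eq_of_beq hh).symm)]
  by_cases h14 : t = "beige"
  · subst h14; decide
  rw [if_neg (fun hh => h14 (eq_of_beq hh).symm)]
  by_cases h15 : t = "grey"
  · subst h15; decide
  rw [if_neg (fun hh => h15 (eq_of_beq hh).symm)]
  by_cases h16 : t = "gray"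
  · subst h16; decide
  rw [if_neg (fun hh => h16 (eq_of_beq hh).symm)]
  by_cases h17 : t = "silver"
  · subst h17; decide
  rw [if_neg (fun hh => h17 (eq_of_beq hh).symm)]
  simp [PySem.Dict.get?, h10, h11]

lemma pv_c5 (t : String) : (["brown","tan","beige"]:List String).contains t = (pvColorIndex.get? t == some 5) := by
  simp only [pvColorIndex, PySem.Dict.get?_mk_cons, List.contains_cons, List.contains_nil]
  by_cases h0 : t = "black"
  · subst h0; decide
  rw [if_neg (fun hh => h0 (eq_of_beq hh).symm)]
  by_cases h1 : t = "dark"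
  · subst h1; decide
  rw [if_neg (fun hh => h1 (eq_of_beq hh).symm)]
  by_cases h2 : t = "white"
  · subst h2; decide
  rw [if_neg (fun hh => h2 (eq_of_beq hh).symm)]
  by_cases h3 : t = "light"
  · subst h3; decide
  rw [if_neg (fun hh => h3 (eq_of_beq hh).symm)]
  by_cases h4 : t = "blue"
  · subst h4; decide
  rw [if_neg (fun hh => h4 (eq_of_beq hh).symm)]
  by_cases h5 : t = "navy"
  · subst h5; decide
  rw [if_neg (fun hh => h5 (eq_of_beq hh).symm)]
  by_cases h6 : t = "dark blue"
  · subst h6; decide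
  rw [if_neg (fun hh => h6 (eq_of_beq hh).symm)]
  by_cases h7 : t = "red"
  · subst h7; decide
  rw [if_neg (fun hh => h7 (eq_of_beq hh).symm)]
  by_cases h8 : t = "maroon"
  · subst h8; decide
  rw [if_neg (fun hh => h8 (eq_of_beq hh).symm)]
  by_cases h9 : t = "dark red"
  · subst h9; decide
  rw [if_neg (fun hh => h9 (eq_of_beq hh).symm)]
  by_cases h10 : t = "green"
  · subst h10; decide
  rw [if_neg (fun hh => h10 (eq_of_beq hh).symm)]
  by_cases h11 : t = "dark green"
  · subst h11; decide
  rw [if_neg (fun hh => h11 (eq_of_beq hh).symm)]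
  by_cases h12 : t = "brown"
  · subst h12; decide
  rw [if_neg (fun hh => h12 (eq_of_beq hh).symm)]
  by_cases h13 : t = "tan"
  · subst h13; decide
  rw [if_neg (fun hh => h13 (eq_of_beq hh).symm)]
  by_cases h14 : t = "beige"
  · subst h14; decide
  rw [if_neg (fun hh => h14 (eq_of_beq hh).symm)]
  by_cases h15 : t = "grey"
  · subst h15; decide
  rw [if_neg (fun hh => h15 (eq_of_beq hh).symm)]
  by_cases h16 : t = "gray"
  · subst h16; decide
  rw [if_neg (fun hh => h16 (eq_of_beq hh).symm)]
  by_cases h17 : t = "silver"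
  · subst h17; decide
  rw [if_neg (fun hh => h17 (eq_of_beq hh).symm)]
  simp [PySem.Dict.get?, h12, h13, h14]

lemma pv_c6 (t : String) : (["grey","gray","silver"]:List String).contains t = (pvColorIndex.get? t == some 6) := by
  simp only [pvColorIndex, PySem.Dict.get?_mk_cons, List.contains_cons, List.contains_nil]
  by_cases h0 : t = "black"
  · subst h0; decide
  rw [if_neg (fun hh => h0 (eq_of_beq hh).symm)]
  by_cases h1 : t = "dark"
  · subst h1; decide
  rw [if_neg (fun hh => h1 (eq_of_beq hh).symm)]
  by_cases h2 : t = "white"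
  · subst h2; decide
  rw [if_neg (fun hh => h2 (eq_of_beq hh).symm)]
  by_cases h3 : t = "light"
  · subst h3; decide
  rw [if_neg (fun hh => h3 (eq_of_beq hh).symm)]
  by_cases h4 : t = "blue"
  · subst h4; decide
  rw [if_neg (fun hh => h4 (eq_of_beq hh).symm)]
  by_cases h5 : t = "navy"
  · subst h5; decide
  rw [if_neg (fun hh => h5 (eq_of_beq hh).symm)]
  by_cases h6 : t = "dark blue"
  · subst h6; decide
  rw [if_neg (fun hh => h6 (eq_of_beq hh).symm)]
  by_cases h7 : t = "red"
  · subst h7; decide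
  rw [if_neg (fun hh => h7 (eq_of_beq hh).symm)]
  by_cases h8 : t = "maroon"
  · subst h8; decide
  rw [if_neg (fun hh => h8 (eq_of_beq hh).symm)]
  by_cases h9 : t = "dark red"
  · subst h9; decide
  rw [if_neg (fun hh => h9 (eq_of_beq hh).symm)]
  by_cases h10 : t = "green"
  · subst h10; decide
  rw [if_neg (fun hh => h10 (eq_of_beq hh).symm)]
  by_cases h11 : t = "dark green"
  · subst h11; decide
  rw [if_neg (fun hh => h11 (eq_of_beq hh).symm)]
  by_cases h12 : t = "brown"
  · subst h12; decide
  rw [if_neg (fun hh => h12 (eq_of_beq hh).symm)]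
  by_cases h13 : t = "tan"
  · subst h13; decide
  rw [if_neg (fun hh => h13 (eq_of_beq hh).symm)]
  by_cases h14 : t = "beige"
  · subst h14; decide
  rw [if_neg (fun hh => h14 (eq_of_beq hh).symm)]
  by_cases h15 : t = "grey"
  · subst h15; decide
  rw [if_neg (fun hh => h15 (eq_of_beq hh).symm)]
  by_cases h16 : t = "gray"
  · subst h16; decide
  rw [if_neg (fun hh => h16 (eq_of_beq hh).symm)]
  by_cases h17 : t = "silver"
  · subst h17; decide
  rw [if_neg (fun hh => h17 (eq_of_beq hh).symm)]
  simp [PySem.Dict.get?, h15, h16, h17]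

lemma pv_range7 (t : String) (v : Nat) (h : pvColorIndex.get? t = some v) : v < 7 := by
  simp only [pvColorIndex, PySem.Dict.get?_mk_cons] at h
  by_cases h0 : t = "black"
  · subst h0; simp at h; omega
  rw [if_neg (fun hh => h0 (eq_of_beq hh).symm)] at h
  by_cases h1 : t = "dark"
  · subst h1; simp at h; omega
  rw [if_neg (fun hh => h1 (eq_of_beq hh).symm)] at h
  by_cases h2 : t = "white"
  · subst h2; simp at h; omega
  rw [if_neg (fun hh => h2 (eq_of_beq hh).symm)] at h
  by_cases h3 : t = "light"
  · subst h3; simp at h; omega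
  rw [if_neg (fun hh => h3 (eq_of_beq hh).symm)] at h
  by_cases h4 : t = "blue"
  · subst h4; simp at h; omega
  rw [if_neg (fun hh => h4 (eq_of_beq hh).symm)] at h
  by_cases h5 : t = "navy"
  · subst h5; simp at h; omega
  rw [if_neg (fun hh => h5 (eq_of_beq hh).symm)] at h
  by_cases h6 : t = "dark blue"
  · subst h6; simp at h; omega
  rw [if_neg (fun hh => h6 (eq_of_beq hh).symm)] at h
  by_cases h7 : t = "red"
  · subst h7; simp at h; omega
  rw [if_neg (fun hh => h7 (eq_of_beq hh).symm)] at h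
  by_cases h8 : t = "maroon"
  · subst h8; simp at h; omega
  rw [if_neg (fun hh => h8 (eq_of_beq hh).symm)] at h
  by_cases h9 : t = "dark red"
  · subst h9; simp at h; omega
  rw [if_neg (fun hh => h9 (eq_of_beq hh).symm)] at h
  by_cases h10 : t = "green"
  · subst h10; simp at h; omega
  rw [if_neg (fun hh => h10 (eq_of_beq hh).symm)] at h
  by_cases h11 : t = "dark green"
  · subst h11; simp at h; omega
  rw [if_neg (fun hh => h11 (eq_of_beq hh).symm)] at h
  by_cases h12 : t = "brown"
  · subst h12; simp at h; omega
  rw [if_neg (fun hh => h12 (eq_of_beq hh).symm)] at h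
  by_cases h13 : t = "tan"
  · subst h13; simp at h; omega
  rw [if_neg (fun hh => h13 (eq_of_beq hh).symm)] at h
  by_cases h14 : t = "beige"
  · subst h14; simp at h; omega
  rw [if_neg (fun hh => h14 (eq_of_beq hh).symm)] at h
  by_cases h15 : t = "grey"
  · subst h15; simp at h; omega
  rw [if_neg (fun hh => h15 (eq_of_beq hh).symm)] at h
  by_cases h16 : t = "gray"
  · subst h16; simp at h; omega
  rw [if_neg (fun hh => h16 (eq_of_beq hh).symm)] at h
  by_cases h17 : t = "silver"
  · subst h17; simp at h; omega
  rw [if_neg (fun hh => h17 (eq_of_beq hh).symm)] at h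
  simp [PySem.Dict.get?] at h

-- core equivalence on the (already lowered) strings
lemma pv_core_eq (t1 t2 : String) :
    pvGroups.any (fun group => group.contains t1 && group.contains t2) =
      (match pvColorIndex.get? t1 with
       | none => false
       | some g1 => pvColorIndex.get? t2 == some g1) := by
  simp only [pvGroups, List.any_cons, List.any_nil,
    pv_c0 t1, pv_c1 t1, pv_c2 t1, pv_c3 t1, pv_c4 t1, pv_c5 t1, pv_c6 t1,
    pv_c0 t2, pv_c1 t2, pv_c2 t2, pv_c3 t2, pv_c4 t2, pv_c5 t2, pv_c6 t2]
  cases h1 : pvColorIndex.get? t1 with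
  | none => simp
  | some v =>
      have hv := pv_range7 t1 v h1
      interval_cases v <;> cases h2 : pvColorIndex.get? t2 <;> simp_all

-- ===== VERDICT (by name: the statement is the Claim_ definition above) =====
theorem similar_colors_spec : Claim_equal_similar_colors := by
  intro c1 c2 _
  unfold Spec_similar_colors similar_colors similar_colors_alt
  exact pv_core_eq (PySem.Str.lower c1) (PySem.Str.lower c2)
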